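-- pv_equiv track=rewrite | github.com/pypi-data/pypi-mirror-403 | packages/agentform-cli/agentform_cli-0.0.811.tar.gz/agentform_cli-0.0.811/agentform_cli/agentform_runtime/state.py | _find_ternary_operator
-- ===== SOURCE A (Python) =====
-- def _find_ternary_operator(expr: str) -> int:
--     """Find position of ? in ternary expression (not inside quotes)."""
--     in_quotes = False
--     quote_char = None
--     for i, c in enumerate(expr):
--         if c in ('"', "'") and (i == 0 or expr[i - 1] != "\\"):
--             if not in_quotes:
--                 in_quotes = True
--                 quote_char = c
--             elif c == quote_char:
--                 in_quotes = False
--         elif c == "?" and not in_quotes: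
--             return i
--     return -1
-- ===== SOURCE B (Python) =====
-- def _find_ternary_operator(expr: str) -> int:
--     """Find position of ? in ternary expression (not inside quotes)."""
--     n = len(expr)
--     i = 0
--     while i < n:
--         c = expr[i]
--         if c == "?":
--             return i
--         if c in ('"', "'") and (i == 0 or expr[i - 1] != "\\"):
--             # skip over the quoted segment: advance to the matching unescaped quote
--             j = i + 1
--             while j < n and not (expr[j] == c and expr[j - 1] != "\\"):
--                 j += 1
--             i = j + 1
--         else:
--             i += 1
--     return -1
-- ===== Notes on version B (the rewrite author's own statement) =====
-- stated objective: alternative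
-- what changed: Replaced the single flagged pass (in_quotes/quote_char state machine) with an index-based outer scan that, on an unescaped opening quote, runs an explicit inner loop skipping the whole quoted segment up to its matching unescaped closing quote.
import Mathlib
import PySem

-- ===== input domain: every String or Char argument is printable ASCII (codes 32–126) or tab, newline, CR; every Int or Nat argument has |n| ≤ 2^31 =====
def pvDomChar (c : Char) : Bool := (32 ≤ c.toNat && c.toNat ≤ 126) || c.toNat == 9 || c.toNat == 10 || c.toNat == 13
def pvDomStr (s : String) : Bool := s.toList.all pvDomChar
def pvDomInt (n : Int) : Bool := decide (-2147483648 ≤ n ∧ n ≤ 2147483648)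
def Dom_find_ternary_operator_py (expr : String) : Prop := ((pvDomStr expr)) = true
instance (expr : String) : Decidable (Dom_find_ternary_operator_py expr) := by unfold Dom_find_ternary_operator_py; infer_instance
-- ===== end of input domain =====

-- B replaces A's in_quotes/quote_char flag machine by an explicit skip-over-quoted-segment
-- inner loop (alternative decomposition, same cost); proved equal on all inputs.


-- ===== PORT A =====
-- A's loop: enumerate with state (in_quotes, quote_char); prev = expr[i-1] tracked alongside.
def findA_loop : List Char → Int → Option Char → Bool → Option Char → Int
  | [], _, _, _, _ => -1
  | c :: rest, i, prev, inq, qc =>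
    if (c == '"' || c == '\'') && (prev == none || !(prev == some '\\')) then
      if !inq then findA_loop rest (i + 1) (some c) true (some c)
      else if some c == qc then findA_loop rest (i + 1) (some c) false qc
      else findA_loop rest (i + 1) (some c) inq qc
    else if c == '?' && !inq then i
    else findA_loop rest (i + 1) (some c) inq qc

def find_ternary_operator_py (expr : String) : Int :=
  findA_loop expr.toList 0 none false none

-- ===== PORT B =====
-- B's outer while loop (scan mode) and inner while loop (skip a quoted segment), as mutual recursion.
mutual
def loopB : List Char → Int → Option Char → Int
  | [], _, _ => -1
  | c :: rest, i, prev =>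
    if c == '?' then i
    else if (c == '"' || c == '\'') && (prev == none || !(prev == some '\\')) then
      skipB c rest (i + 1) c
    else loopB rest (i + 1) (some c)

def skipB : Char → List Char → Int → Char → Int
  | _, [], _, _ => -1
  | q, c :: rest, j, prev =>
    if c == q && !(prev == '\\') then loopB rest (j + 1) (some q)
    else skipB q rest (j + 1) c
end

def find_ternary_operator_py_alt (expr : String) : Int :=
  loopB expr.toList 0 none

-- ===== PRECONDITION & SPEC =====
def Spec_find_ternary_operator_py (expr : String) (out : Int) : Prop := out = find_ternary_operator_py_alt expr
instance (expr : String) (out : Int) : Decidable (Spec_find_ternary_operator_py expr out) := by unfold Spec_find_ternary_operator_py; infer_instance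

-- ===== CLAIM (what is proved, stated in full; the proofs are below) =====
def Claim_equal_find_ternary_operator_py : Prop := ∀ (expr : String), Dom_find_ternary_operator_py expr → Spec_find_ternary_operator_py expr (find_ternary_operator_py expr)

-- ===== LEMMAS AND PROOFS =====
theorem loop_eq (cs : List Char) :
    (∀ (i : Int) (prev : Option Char) (qc : Option Char),
      findA_loop cs i prev false qc = loopB cs i prev) ∧
    (∀ (j : Int) (p q : Char), (q == '"' || q == '\'') = true →
      findA_loop cs j (some p) true (some q) = skipB q cs j p) := by
  induction cs with
  | nil => exact ⟨fun _ _ _ => rfl, fun _ _ _ _ => rfl⟩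
  | cons c rest ih =>
    refine ⟨fun i prev qc => ?_, fun j p q hq => ?_⟩
    · simp only [findA_loop, loopB]
      by_cases hquote : (c = '"' ∨ c = '\'')
      · by_cases hesc : (prev = none ∨ ¬ prev = some '\\')
        · have hnq : ¬ c = '?' := by rcases hquote with h | h <;> simp [h]
          have hqb : (c == '"' || c == '\'') = true := by
            rcases hquote with h | h <;> simp [h]
          simp [hquote, hesc, hnq, ih.2 (i + 1) c c hqb]
        · by_cases hc : c = '?'
          · simp [hc]
          · simp [hesc, hc, ih.1]
      · by_cases hc : c = '?'
        · simp [hc]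
        · simp [hquote, hc, ih.1]
    · have hq' : (q = '"' ∨ q = '\'') := by
        rcases Bool.or_eq_true_iff.mp hq with h | h
        · exact Or.inl (by simpa using h)
        · exact Or.inr (by simpa using h)
      simp only [findA_loop, skipB]
      by_cases hp : p = '\\'
      · simp [hp, ih.2 (j + 1) c q hq]
      · by_cases hcq2 : c = q
        · subst hcq2
          simp [hq', hp, ih.1]
        · by_cases hquote : (c = '"' ∨ c = '\'')
          · simp [hquote, hp, hcq2, ih.2 (j + 1) c q hq]
          · simp [hquote, hcq2, ih.2 (j + 1) c q hq]

-- ===== VERDICT (by name: the statement is the Claim_ definition above) =====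
theorem find_ternary_operator_py_spec : Claim_equal_find_ternary_operator_py := by
  intro expr _
  unfold Spec_find_ternary_operator_py find_ternary_operator_py find_ternary_operator_py_alt
  exact (loop_eq expr.toList).1 0 none none
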